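-- pv_equiv track=rewrite | github.com/cjcolman/advent_of_code | 2015/Connor/1/1.py | find_basement_position
-- ===== SOURCE A (Python) =====
-- def find_basement_position(data):
--     current_floor = 0
--     instruction_number = 1
--     for instruction in data:
--         current_floor += {'(': 1, ')': -1}[instruction]
--         if current_floor == -1:
--             return instruction_number
--         instruction_number += 1
-- ===== SOURCE B (Python) =====
-- def find_basement_position(data):
--     deltas = [{'(': 1, ')': -1}[c] for c in data]
--     floors = []
--     total = 0
--     for d in deltas:
--         total += d
--         floors.append(total)
--     try:
--         return floors.index(-1) + 1
--     except ValueError: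
--         return None
-- ===== Notes on version B (the rewrite author's own statement) =====
-- stated objective: alternative
-- what changed: A is a single early-exit loop carrying a running floor and a 1-based counter; B separates the phases: it materializes the per-character deltas, builds the whole prefix-sum trajectory, and then answers with list.index(-1)+1 (None via ValueError).
-- outside the precondition, e.g. on find_basement_position(')x'): A returns 1, B raises KeyError; on find_basement_position('a'): A raises KeyError, B raises KeyError
import Mathlib
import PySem

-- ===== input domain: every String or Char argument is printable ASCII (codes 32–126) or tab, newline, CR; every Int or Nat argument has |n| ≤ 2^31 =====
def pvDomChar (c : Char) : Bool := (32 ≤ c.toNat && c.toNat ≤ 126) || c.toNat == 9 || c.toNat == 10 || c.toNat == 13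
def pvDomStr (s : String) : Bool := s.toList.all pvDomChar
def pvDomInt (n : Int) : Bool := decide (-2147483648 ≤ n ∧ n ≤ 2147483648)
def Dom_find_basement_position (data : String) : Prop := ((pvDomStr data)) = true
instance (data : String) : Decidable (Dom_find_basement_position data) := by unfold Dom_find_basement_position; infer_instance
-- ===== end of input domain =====

-- B separates the trajectory from the search (deltas → prefix sums → list.index) instead of A's
-- single early-exit running-floor loop; same O(n), objective: alternative decomposition.

-- ===== PORT A =====
-- the dict literal {'(': 1, ')': -1}[instruction]; none = KeyError (excluded by Pre_)
def pvStep? (c : Char) : Option Int :=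
  PySem.Dict.get? (PySem.Dict.ofList [('(', (1 : Int)), (')', (-1 : Int))]) c

-- A's for-loop with state (current_floor, instruction_number); early return on -1
def pvLoopA (current_floor instruction_number : Int) : List Char → Option Int
  | [] => none
  | c :: rest =>
    match pvStep? c with
    | none => none  -- KeyError in Python A; outside Pre_
    | some d =>
      if current_floor + d = -1 then some instruction_number
      else pvLoopA (current_floor + d) (instruction_number + 1) rest

def find_basement_position (data : String) : Option Int :=
  pvLoopA 0 1 data.toList

-- ===== PORT B =====
-- the accumulate loop: for d in deltas: total += d; floors.append(total)
def pvAccFrom (total : Int) : List Int → List Int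
  | [] => []
  | d :: ds => (total + d) :: pvAccFrom (total + d) ds

def find_basement_position_alt (data : String) : Option Int :=
  match data.toList.mapM pvStep? with
  | none => none  -- KeyError in the comprehension; outside Pre_
  | some deltas =>
    let floors := pvAccFrom 0 deltas
    match PySem.List.index? floors (-1) with
    | some i => some ((i : Int) + 1)
    | none => none

-- ===== PRECONDITION & SPEC =====
-- Pre_ excludes strings containing a character other than '(' or ')': on those the Python
-- programs raise KeyError, except that A returns early when it reaches floor -1 before the
-- bad character (e.g. ")x") while the eager B still raises there — both excluded.
def Pre_find_basement_position (data : String) : Prop :=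
  data.toList.all (fun c => c == '(' || c == ')') = true
instance (data : String) : Decidable (Pre_find_basement_position data) := by
  unfold Pre_find_basement_position; infer_instance

def pvWitness_find_basement_position : String := "(()))"

def Spec_find_basement_position (data : String) (out : Option Int) : Prop := out = find_basement_position_alt data
instance (data : String) (out : Option Int) : Decidable (Spec_find_basement_position data out) := by unfold Spec_find_basement_position; infer_instance

-- ===== CLAIM (what is proved, stated in full; the proofs are below) =====
def Claim_equal_find_basement_position : Prop := ∀ (data : String), Dom_find_basement_position data → Pre_find_basement_position data → Spec_find_basement_position data (find_basement_position data)

-- ===== LEMMAS AND PROOFS =====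

theorem pvStep?_valid {c : Char} (h : c = '(' ∨ c = ')') :
    pvStep? c = some (if c = '(' then 1 else -1) := by
  rcases h with h | h <;> subst h <;> decide

-- the delta comprehension succeeds on valid strings
theorem mapM_step_valid : ∀ (cs : List Char), (∀ c ∈ cs, c = '(' ∨ c = ')') →
    cs.mapM pvStep? = some (cs.map (fun c => if c = '(' then (1 : Int) else -1)) := by
  intro cs h
  induction cs with
  | nil => rfl
  | cons c rest ih =>
    have hc := pvStep?_valid (h c (by simp))
    simp [List.mapM_cons, hc, ih (fun x hx => h x (by simp [hx]))]

-- A's loop equals "index of -1 in the trajectory from the same floor", shifted by idx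
theorem loopA_eq_index : ∀ (cs : List Char) (floor idx : Int),
    (∀ c ∈ cs, c = '(' ∨ c = ')') →
    pvLoopA floor idx cs =
      (match PySem.List.index? (pvAccFrom floor (cs.map (fun c => if c = '(' then (1 : Int) else -1))) (-1) with
       | some i => some (idx + (i : Int))
       | none => none) := by
  intro cs
  induction cs with
  | nil => intro floor idx _; rfl
  | cons c rest ih =>
    intro floor idx h
    have hc := pvStep?_valid (h c (by simp))
    have hrest : ∀ x ∈ rest, x = '(' ∨ x = ')' := fun x hx => h x (by simp [hx])
    simp only [List.map_cons, pvAccFrom]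
    by_cases hfl : floor + (if c = '(' then (1 : Int) else -1) = -1
    · rw [hfl, PySem.List.index?_cons_self]
      simp [pvLoopA, hc, hfl]
    · rw [PySem.List.index?_cons_of_ne _ hfl]
      simp only [pvLoopA, hc, if_neg hfl]
      rw [ih (floor + (if c = '(' then (1 : Int) else -1)) (idx + 1) hrest]
      cases hix : PySem.List.index? (pvAccFrom (floor + (if c = '(' then (1 : Int) else -1)) (rest.map (fun c => if c = '(' then (1 : Int) else -1))) (-1) with
      | none => simp
      | some i =>
        simp only [Option.map_some]
        push_cast
        ring_nf

-- ===== VERDICT (by name: the statement is the Claim_ definition above) =====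
theorem find_basement_position_spec : Claim_equal_find_basement_position := by
  intro data _ hpre
  have hpre : ∀ c ∈ data.toList, c = '(' ∨ c = ')' := by
    intro c hc
    have := List.all_eq_true.mp hpre c hc
    simpa using this
  unfold Spec_find_basement_position find_basement_position
  simp only [find_basement_position_alt, mapM_step_valid data.toList hpre]
  rw [loopA_eq_index data.toList 0 1 hpre]
  cases hix : PySem.List.index? (pvAccFrom 0 (data.toList.map (fun c => if c = '(' then (1 : Int) else -1))) (-1) with
  | none => rfl
  | some i => simp [Int.add_comm]
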